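-- pv_equiv track=rewrite | github.com/DucVuMinh/challenge | angry_child/angry_child.py | angryChildren
-- ===== SOURCE A (Python) =====
-- def angryChildren(k, packets):
--     # sorting
--     packets.sort()
--     # cal sub
--     sub = []
--     for i in range(1, len(packets)):
--         sub.append(packets[i] - packets[i - 1])
--     # cal unfairness sum temp
--     res_temp = []
--     # n-1 items
--     for i in range(k - 2, len(sub)):
--         temp = 0
--         k_val = []
--         begin = i - k + 2
--         end = i+1
--         for j in range(begin, end):
--             k_val.append(sub[j])
--          # k items
--         for j in range(k-1):
--             mul = (j+1) * (k-1-j)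
--             temp += mul* k_val[j]
--         res_temp.append(temp)
--     # find the best
--     res = res_temp[0]
--     for i in res_temp:
--         if res > i:
--             res = i
--     return res
-- ===== SOURCE B (Python) =====
-- def angryChildren(k, packets):
--     # B: sort once, then evaluate each window's pairwise-diff sum in O(1) via
--     # prefix sums of the values and of index-weighted values.
--     a = sorted(packets)
--     n = len(a)
--     P = [0]
--     W = [0]
--     for t, v in enumerate(a):
--         P.append(P[-1] + v)
--         W.append(W[-1] + t * v)
--     best = None
--     for i in range(n - k + 1):
--         ps = P[i + k] - P[i]
--         ws = W[i + k] - W[i]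
--         cost = 2 * (ws - i * ps) - (k - 1) * ps
--         if best is None or cost < best:
--             best = cost
--     return best
-- ===== Notes on version B (the rewrite author's own statement) =====
-- stated objective: faster
-- what changed: B sorts once and evaluates each size-k window's pairwise-difference sum in O(1) from prefix sums of the values and of index-weighted values, instead of A's per-window O(k) pass over a rebuilt difference slice; note A sorts the caller's list in place while B does not.
-- outside the precondition, e.g. on angryChildren(1, []): A returns 0, B returns None; on angryChildren(-1, [1, 5, 2]): A returns 0, B raises IndexError; on angryChildren(3, [1, 2]): A raises IndexError, B returns None
import Mathlib
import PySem

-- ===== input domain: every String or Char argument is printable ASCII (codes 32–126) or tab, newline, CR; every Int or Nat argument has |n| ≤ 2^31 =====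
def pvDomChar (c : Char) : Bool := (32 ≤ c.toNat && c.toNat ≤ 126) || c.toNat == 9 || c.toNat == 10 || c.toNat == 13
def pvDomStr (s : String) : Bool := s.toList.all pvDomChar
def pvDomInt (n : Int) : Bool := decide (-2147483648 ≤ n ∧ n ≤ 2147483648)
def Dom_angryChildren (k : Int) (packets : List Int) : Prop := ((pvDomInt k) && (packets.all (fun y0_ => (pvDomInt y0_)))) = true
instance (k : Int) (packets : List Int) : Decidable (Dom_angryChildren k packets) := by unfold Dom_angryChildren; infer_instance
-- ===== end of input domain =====

-- B replaces A's per-window O(k) pass over a rebuilt difference slice by an O(1)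
-- prefix-sum evaluation of each window (objective: faster, asymptotically).
-- A sorts the caller's list in place; B does not — the equivalence is about the return value.

-- ===== PORT A =====
def angryChildren (k : Int) (packets : List Int) : Int :=
  let ps := PySem.List.sorted packets (fun x => x) false
  let sub := (PySem.List.pyRange 1 (ps.length : Int) 1).foldl
      (fun acc i => acc ++ [PySem.List.pyGetD ps i 0 - PySem.List.pyGetD ps (i - 1) 0]) []
  let res_temp := (PySem.List.pyRange (k - 2) (sub.length : Int) 1).foldl
      (fun acc i =>
        let k_val := (PySem.List.pyRange (i - k + 2) (i + 1) 1).foldl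
            (fun kv j => kv ++ [PySem.List.pyGetD sub j 0]) []
        let temp := (PySem.List.pyRange 0 (k - 1) 1).foldl
            (fun temp j => temp + (j + 1) * (k - 1 - j) * PySem.List.pyGetD k_val j 0) 0
        acc ++ [temp]) []
  -- Python 'res_temp[0]' raises IndexError on an empty res_temp: those inputs are outside Pre_
  let res := PySem.List.pyGetD res_temp 0 0
  res_temp.foldl (fun res i => if res > i then i else res) res

-- ===== PORT B =====
def angryChildren_alt (k : Int) (packets : List Int) : Int :=
  let a := PySem.List.sorted packets (fun x => x) false
  let n : Int := (a.length : Int)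
  let PW := (PySem.List.enumerate a 0).foldl
      (fun (pw : List Int × List Int) tv =>
        (pw.1 ++ [PySem.List.pyGetD pw.1 (-1) 0 + tv.2],
         pw.2 ++ [PySem.List.pyGetD pw.2 (-1) 0 + tv.1 * tv.2]))
      ([0], [0])
  let best := (PySem.List.pyRange 0 (n - k + 1) 1).foldl
      (fun (best : Option Int) i =>
        let ps := PySem.List.pyGetD PW.1 (i + k) 0 - PySem.List.pyGetD PW.1 i 0
        let ws := PySem.List.pyGetD PW.2 (i + k) 0 - PySem.List.pyGetD PW.2 i 0
        let cost := 2 * (ws - i * ps) - (k - 1) * ps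
        match best with
        | none => some cost
        | some b => if cost < b then some cost else some b)
      none
  -- Python returns None when there is no window; those inputs are outside Pre_
  best.getD 0

-- ===== PRECONDITION & SPEC =====
-- Pre_ admits the task's natural domain 1 ≤ k ≤ len(packets) plus the degenerate k = 0 (both
-- return 0 there); it excludes k > len(packets) ≥ 1, where A raises IndexError, and negative k
-- (and k = 1 on an empty list), outside the natural domain, where A's returned 0 is an accident
-- of empty inner loops and B raises or returns None.
def Pre_angryChildren (k : Int) (packets : List Int) : Prop :=
  k = 0 ∨ (1 ≤ k ∧ k ≤ (packets.length : Int))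
instance (k : Int) (packets : List Int) : Decidable (Pre_angryChildren k packets) := by
  unfold Pre_angryChildren; infer_instance

def pvWitness_angryChildren : Int × List Int := (2, [9, 1, 4])

def Spec_angryChildren (k : Int) (packets : List Int) (out : Int) : Prop := out = angryChildren_alt k packets
instance (k : Int) (packets : List Int) (out : Int) : Decidable (Spec_angryChildren k packets out) := by unfold Spec_angryChildren; infer_instance

-- ===== CLAIM (what is proved, stated in full; the proofs are below) =====
def Claim_equal_angryChildren : Prop := ∀ (k : Int) (packets : List Int), Dom_angryChildren k packets → Pre_angryChildren k packets → Spec_angryChildren k packets (angryChildren k packets)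

-- ===== LEMMAS AND PROOFS =====

-- partial-sum lists produced by B's building loop
def pvPsums : Int → List Int → List Int
  | _, [] => []
  | c, v :: t => (c + v) :: pvPsums (c + v) t

def pvWsums (s c : Int) : List Int → List Int
  | [] => []
  | v :: t => (c + s * v) :: pvWsums (s + 1) (c + s * v) t

-- index-weighted sum Σ (s+j) * l[j]
def pvWsum (s : Int) : List Int → Int
  | [] => 0
  | v :: t => s * v + pvWsum (s + 1) t

-- B's building loop produces exactly the partial-sum lists
theorem pvB_fold (l : List Int) : ∀ (s : Int) (P W : List Int) (hP : P ≠ []) (hW : W ≠ []),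
    (PySem.List.enumerate l s).foldl
      (fun (pw : List Int × List Int) tv =>
        (pw.1 ++ [PySem.List.pyGetD pw.1 (-1) 0 + tv.2],
         pw.2 ++ [PySem.List.pyGetD pw.2 (-1) 0 + tv.1 * tv.2]))
      (P, W)
    = (P ++ pvPsums (P.getLast hP) l, W ++ pvWsums s (W.getLast hW) l) := by
  induction l with
  | nil => intro s P W hP hW; simp [PySem.List.enumerate_nil, pvPsums, pvWsums]
  | cons v t ih =>
    intro s P W hP hW
    rw [PySem.List.enumerate_cons, List.foldl_cons]
    rw [PySem.List.pyGetD_neg_one P 0 hP, PySem.List.pyGetD_neg_one W 0 hW]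
    rw [ih (s+1) (P ++ [P.getLast hP + v]) (W ++ [W.getLast hW + s * v])
        (by simp) (by simp)]
    simp [pvPsums, pvWsums]

-- lookup in the partial-sum lists
theorem pvPsums_getD (l : List Int) : ∀ (c : Int) (m : Nat), m ≤ l.length →
    (c :: pvPsums c l).getD m 0 = c + (l.take m).sum := by
  induction l with
  | nil => intro c m hm; obtain rfl := Nat.le_zero.mp hm; simp [pvPsums]
  | cons v t ih =>
    intro c m hm
    cases m with
    | zero => simp
    | succ m =>
      simpa [pvPsums, add_assoc] using ih (c + v) m (by simpa using hm)

theorem pvWsums_getD (l : List Int) : ∀ (s c : Int) (m : Nat), m ≤ l.length →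
    (c :: pvWsums s c l).getD m 0 = c + pvWsum s (l.take m) := by
  induction l with
  | nil => intro s c m hm; obtain rfl := Nat.le_zero.mp hm; simp [pvWsums, pvWsum]
  | cons v t ih =>
    intro s c m hm
    cases m with
    | zero => simp [pvWsum]
    | succ m =>
      simpa [pvWsums, pvWsum, add_assoc] using ih (s+1) (c + s*v) m (by simpa using hm)

-- sums over a prefix as Finset sums of getD
theorem pvSum_take (l : List Int) : ∀ (m : Nat), m ≤ l.length →
    (l.take m).sum = ∑ j ∈ Finset.range m, l.getD j 0 := by
  induction l with
  | nil => intro m hm; obtain rfl := Nat.le_zero.mp hm; simp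
  | cons v t ih =>
    intro m hm
    cases m with
    | zero => simp
    | succ m =>
      rw [Finset.sum_range_succ' (fun j => (v :: t).getD j 0) m]
      simp [ih m (by simpa using hm), add_comm]

theorem pvWsum_take (l : List Int) : ∀ (s : Int) (m : Nat), m ≤ l.length →
    pvWsum s (l.take m) = ∑ j ∈ Finset.range m, (s + (j : Int)) * l.getD j 0 := by
  induction l with
  | nil => intro s m hm; obtain rfl := Nat.le_zero.mp hm; simp [pvWsum]
  | cons v t ih =>
    intro s m hm
    cases m with
    | zero => simp [pvWsum]
    | succ m =>
      have hT := ih (s+1) m (by simpa using hm)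
      rw [Finset.sum_range_succ' (fun j => (s + (j:Int)) * (v :: t).getD j 0) m]
      simp only [List.take_succ_cons, pvWsum, hT, List.getD_cons_succ, List.getD_cons_zero,
        Nat.cast_zero, add_zero]
      rw [add_comm]
      congr 1
      refine Finset.sum_congr rfl (fun j _ => ?_)
      push_cast
      ring

-- a running min with a Some accumulator is the plain running min
theorem pvOptFold (t : List Int) : ∀ (b : Int),
    t.foldl
      (fun (best : Option Int) c =>
        match best with
        | none => some c
        | some b => if c < b then some c else some b) (some b)
    = some (t.foldl (fun res i => if res > i then i else res) b) := by
  induction t with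
  | nil => intro b; rfl
  | cons x t ih =>
    intro b
    rw [List.foldl_cons, List.foldl_cons]
    by_cases h : x < b
    · simpa [h, gt_iff_lt] using ih x
    · simpa [h, gt_iff_lt] using ih b

-- sum of a mapped range as a Finset sum
theorem pvSumList (f : Nat → Int) (n : Nat) :
    ((List.range n).map f).sum = ∑ i ∈ Finset.range n, f i := by
  induction n with
  | zero => simp
  | succ n ih => rw [List.range_succ, Finset.sum_range_succ, List.map_append]; simp [ih]

-- the min-folds agree
theorem pvMinFold (x : Int) (t : List Int) :
    (x :: t).foldl (fun res i => if res > i then i else res) (PySem.List.pyGetD (x :: t) 0 0)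
    = ((x :: t).foldl
        (fun (best : Option Int) c =>
          match best with
          | none => some c
          | some b => if c < b then some c else some b) none).getD 0 := by
  rw [List.foldl_cons, List.foldl_cons, pvOptFold]
  simp [PySem.List.pyGetD_zero_cons]

-- with k = 0 every window value is 0 on both sides
theorem pvA_zero (l : List Int) :
    (l.map (fun _ => (0 : Int))).foldl (fun res i => if res > i then i else res)
      (PySem.List.pyGetD (l.map (fun _ => (0 : Int))) 0 0) = 0 := by
  cases l with
  | nil => simp [PySem.List.pyGetD_zero]
  | cons x t =>
    simp only [List.map_cons, PySem.List.pyGetD_zero_cons, List.foldl_cons, gt_iff_lt,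
      lt_irrefl, if_false]
    induction t with
    | nil => simp
    | cons y t ih => simpa using ih

theorem pvB_zero_aux (l : List Int) :
    l.foldl
      (fun (best : Option Int) _ =>
        match best with
        | none => some (0 : Int)
        | some b => if (0 : Int) < b then some 0 else some b) (some 0) = some 0 := by
  induction l with
  | nil => rfl
  | cons x t ih => simpa using ih

theorem pvB_zero (l : List Int) :
    (l.foldl
      (fun (best : Option Int) _ =>
        match best with
        | none => some (0 : Int)
        | some b => if (0 : Int) < b then some 0 else some b) none).getD 0 = 0 := by
  cases l with
  | nil => rfl
  | cons x t => rw [List.foldl_cons]; simp [pvB_zero_aux]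

-- fused form of the two min-folds over a mapped range
theorem pvFusedMinFold2 (f g : Nat → Int) (M : Nat) (hM : 1 ≤ M)
    (hfg : ∀ t ∈ List.range M, f t = g t) :
    (List.range M).foldl (fun x y => if x > f y then f y else x)
       (PySem.List.pyGetD ((List.range M).map g) 0 0)
    = ((List.range M).foldl
        (fun (best : Option Int) t =>
          match best with
          | none => some (g t)
          | some b => if g t < b then some (g t) else some b) none).getD 0 := by
  have h1 : (List.range M).foldl (fun x y => if x > f y then f y else x)
      (PySem.List.pyGetD ((List.range M).map g) 0 0)
      = (List.range M).foldl (fun x y => if x > g y then g y else x)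
      (PySem.List.pyGetD ((List.range M).map g) 0 0) := by
    apply PySem.List.foldl_congr_mem
    intro acc x hx
    rw [hfg x hx]
  rw [h1]
  rw [show (List.foldl (fun (best : Option Int) t =>
        match best with
        | none => some (g t)
        | some b => if g t < b then some (g t) else some b) none (List.range M))
      = ((List.range M).map g).foldl
          (fun (best : Option Int) c =>
            match best with
            | none => some c
            | some b => if c < b then some c else some b) none from
      (List.foldl_map (f := g)
        (g := fun (best : Option Int) c =>
          match best with
          | none => some c
          | some b => if c < b then some c else some b)
        (l := List.range M) (init := none)).symm]
  rw [show (List.foldl (fun (x : Int) (y : Nat) => if x > g y then g y else x)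
        (PySem.List.pyGetD ((List.range M).map g) 0 0) (List.range M))
      = ((List.range M).map g).foldl (fun res i => if res > i then i else res)
          (PySem.List.pyGetD ((List.range M).map g) 0 0) from
      (List.foldl_map (f := g) (g := fun (res i : Int) => if res > i then i else res)
        (l := List.range M)
        (init := PySem.List.pyGetD ((List.range M).map g) 0 0)).symm]
  obtain ⟨x, tl, hxt⟩ : ∃ x tl, (List.range M).map g = x :: tl := by
    cases hcase : (List.range M).map g with
    | nil =>
      exfalso
      have := congrArg List.length hcase
      simp at this
      omega
    | cons x tl => exact ⟨x, tl, rfl⟩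
  rw [hxt]
  exact pvMinFold x tl

-- the central identity: A's weighted difference sum over a window = B's prefix-sum cost
theorem pvCore (g : Nat → Int) (K m : Nat) (hK : 1 ≤ K) :
    (∑ j ∈ Finset.range (K - 1),
        ((j : Int) + 1) * ((K : Int) - 1 - (j : Int)) * (g (m + j + 1) - g (m + j)))
    = 2 * ((∑ j ∈ Finset.range (m + K), (j : Int) * g j) - (∑ j ∈ Finset.range m, (j : Int) * g j)
            - (m : Int) * ((∑ j ∈ Finset.range (m + K), g j) - (∑ j ∈ Finset.range m, g j)))
      - ((K : Int) - 1) * ((∑ j ∈ Finset.range (m + K), g j) - (∑ j ∈ Finset.range m, g j)) := by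
  obtain ⟨n, rfl⟩ : ∃ n, K = n + 1 := ⟨K - 1, by omega⟩
  have hsplit : (∑ j ∈ Finset.range ((n+1) - 1),
        ((j : Int) + 1) * (((n+1 : Nat) : Int) - 1 - (j : Int)) * (g (m + j + 1) - g (m + j)))
      = (∑ j ∈ Finset.range n, ((j:Int)+1) * ((n:Int) - (j:Int)) * g (m + j + 1))
        - (∑ j ∈ Finset.range n, ((j:Int)+1) * ((n:Int) - (j:Int)) * g (m + j)) := by
    rw [← Finset.sum_sub_distrib]
    refine Finset.sum_congr (by norm_num) (fun j _ => ?_)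
    push_cast
    ring
  have h1 : (∑ j ∈ Finset.range (n+1), (j : Int) * ((n:Int) + 1 - (j:Int)) * g (m + j))
      = ∑ j ∈ Finset.range n, ((j:Int)+1) * ((n:Int) - (j:Int)) * g (m + j + 1) := by
    rw [Finset.sum_range_succ' (fun j => (j : Int) * ((n:Int) + 1 - (j:Int)) * g (m + j)) n]
    simp only [Nat.cast_zero, zero_mul, add_zero]
    refine Finset.sum_congr rfl (fun j _ => ?_)
    rw [show m + (j+1) = m + j + 1 from rfl]
    push_cast
    ring
  have h2 : (∑ j ∈ Finset.range n, ((j:Int)+1) * ((n:Int) - (j:Int)) * g (m + j))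
      = ∑ j ∈ Finset.range (n+1), ((j:Int)+1) * ((n:Int) - (j:Int)) * g (m + j) := by
    rw [Finset.sum_range_succ]
    simp
  have hL : (∑ j ∈ Finset.range ((n+1) - 1),
        ((j : Int) + 1) * (((n+1 : Nat) : Int) - 1 - (j : Int)) * (g (m + j + 1) - g (m + j)))
      = 2 * (∑ i ∈ Finset.range (n+1), (i : Int) * g (m + i))
        - (n : Int) * (∑ i ∈ Finset.range (n+1), g (m + i)) := by
    rw [hsplit, ← h1, h2, ← Finset.sum_sub_distrib,
        Finset.mul_sum, Finset.mul_sum, ← Finset.sum_sub_distrib]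
    refine Finset.sum_congr rfl (fun j _ => ?_)
    ring
  have hA : (∑ i ∈ Finset.range (n+1), ((m + i : Nat) : Int) * g (m + i))
      = (m : Int) * (∑ i ∈ Finset.range (n+1), g (m + i))
        + (∑ i ∈ Finset.range (n+1), (i : Int) * g (m + i)) := by
    rw [Finset.mul_sum, ← Finset.sum_add_distrib]
    refine Finset.sum_congr rfl (fun i _ => ?_)
    push_cast
    ring
  rw [Finset.sum_range_add (fun j => (j : Int) * g j) m (n+1),
      Finset.sum_range_add (fun j => g j) m (n+1)]
  rw [hL, hA]
  push_cast
  ring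

-- ===== VERDICT (by name: the statement is the Claim_ definition above) =====
theorem angryChildren_spec : Claim_equal_angryChildren := by
  intro k packets _ hpre
  rcases hpre with rfl | ⟨hk1, hk2⟩
  · -- k = 0: every window value is 0 on both sides
    unfold Spec_angryChildren
    simp only [angryChildren, angryChildren_alt]
    rw [show PySem.List.pyRange 0 ((0 : Int) - 1) 1 = [] from
      PySem.List.pyRange_one_eq_nil (by norm_num)]
    simp only [List.foldl_nil, PySem.List.foldl_append_singleton_eq_map, List.nil_append,
      add_zero, sub_self, mul_zero, sub_zero, zero_sub]
    rw [pvA_zero, pvB_zero]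
  obtain ⟨K, rfl⟩ : ∃ K : Nat, k = (K : Int) :=
    ⟨k.toNat, (Int.toNat_of_nonneg (by omega)).symm⟩
  unfold Spec_angryChildren
  simp only [angryChildren, angryChildren_alt]
  generalize hA : PySem.List.sorted packets (fun x => x) false = a
  have hlen : a.length = packets.length := by
    rw [← hA]; exact PySem.List.length_sorted packets _ false
  have hK1 : 1 ≤ K := by exact_mod_cast hk1
  have hKN : K ≤ a.length := by rw [hlen]; exact_mod_cast hk2
  have hN1 : 1 ≤ a.length := le_trans hK1 hKN
  -- rewrite all append-accumulating and summing loops as maps / sums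
  simp only [PySem.List.foldl_append_singleton_eq_map, PySem.List.foldl_add, List.nil_append]
  -- the difference list
  have hsub : (List.map (fun i => PySem.List.pyGetD a i 0 - PySem.List.pyGetD a (i - 1) 0)
      (PySem.List.pyRange 1 (a.length : Int) 1))
      = (List.range (a.length - 1)).map (fun u => a.getD (u+1) 0 - a.getD u 0) := by
    rw [PySem.List.pyRange_one, List.map_map]
    rw [show ((a.length : Int) - 1).toNat = a.length - 1 by omega]
    refine List.map_congr_left (fun u hu => ?_)
    simp only [Function.comp_apply]
    rw [show (1 + (u:Int)) = ((u+1 : Nat) : Int) by push_cast; ring]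
    rw [show ((u+1 : Nat) : Int) - 1 = ((u : Nat) : Int) by push_cast; ring]
    rw [PySem.List.pyGetD_natCast, PySem.List.pyGetD_natCast]
  rw [hsub]
  -- B's prefix lists
  rw [pvB_fold a 0 [0] [0] (by simp) (by simp)]
  simp only [List.getLast_singleton, List.singleton_append]
  -- both index ranges have the same length M
  have hMlen : ((List.range (a.length - 1)).map
      (fun u => a.getD (u+1) 0 - a.getD u 0)).length = a.length - 1 := by simp
  rw [hMlen]
  set M : Nat := a.length - K + 1 with hM
  have hr1 : PySem.List.pyRange ((K : Int) - 2) ((a.length - 1 : Nat) : Int) 1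
      = (List.range M).map (fun t : Nat => (K : Int) - 2 + (t : Int)) := by
    have e1 : (((a.length - 1 : Nat) : Int) - ((K : Int) - 2)).toNat = M := by omega
    rw [PySem.List.pyRange_one, e1]
  have hr2 : PySem.List.pyRange 0 ((a.length : Int) - (K : Int) + 1) 1
      = (List.range M).map (fun t : Nat => (0 : Int) + (t : Int)) := by
    have e2 : (((a.length : Int) - (K : Int) + 1) - 0).toNat = M := by omega
    rw [PySem.List.pyRange_one, e2]
  rw [hr1, hr2, List.map_map]
  simp only [List.foldl_map]
  -- the element-wise identity between A's window value and B's prefix-sum cost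
  have hFG : ∀ t ∈ List.range M,
      ((fun i =>
          0 + (List.map (fun j => ((j : Int) + 1) * ((K : Int) - 1 - j) *
                PySem.List.pyGetD
                  (List.map (fun j => PySem.List.pyGetD
                      ((List.range (a.length - 1)).map (fun u => a.getD (u+1) 0 - a.getD u 0)) j 0)
                    (PySem.List.pyRange (i - (K : Int) + 2) (i + 1) 1)) j 0)
              (PySem.List.pyRange 0 ((K : Int) - 1) 1)).sum) ∘
        (fun t : Nat => (K : Int) - 2 + (t : Int))) t
      = (2 * ((PySem.List.pyGetD (0 :: pvWsums 0 0 a) ((0 : Int) + (t : Int) + (K : Int)) 0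
                - PySem.List.pyGetD (0 :: pvWsums 0 0 a) ((0 : Int) + (t : Int)) 0)
              - ((0 : Int) + (t : Int)) *
                (PySem.List.pyGetD (0 :: pvPsums 0 a) ((0 : Int) + (t : Int) + (K : Int)) 0
                  - PySem.List.pyGetD (0 :: pvPsums 0 a) ((0 : Int) + (t : Int)) 0))
          - ((K : Int) - 1) *
              (PySem.List.pyGetD (0 :: pvPsums 0 a) ((0 : Int) + (t : Int) + (K : Int)) 0
                - PySem.List.pyGetD (0 :: pvPsums 0 a) ((0 : Int) + (t : Int)) 0)) := by
    intro t ht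
    have htM : t < M := List.mem_range.mp ht
    have htK : t + K ≤ a.length := by omega
    simp only [Function.comp_apply, zero_add]
    -- A side
    rw [show (K : Int) - 2 + (t : Int) - (K : Int) + 2 = (t : Int) by ring]
    rw [show (K : Int) - 2 + (t : Int) + 1 = (t : Int) + ((K : Int) - 1) by ring]
    rw [PySem.List.pyRange_one 0 ((K : Int) - 1), List.map_map,
        show ((K : Int) - 1 - 0).toNat = K - 1 by omega, pvSumList]
    -- B side
    rw [show (t : Int) + (K : Int) = ((t + K : Nat) : Int) by push_cast; ring]
    rw [PySem.List.pyGetD_natCast, PySem.List.pyGetD_natCast,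
        PySem.List.pyGetD_natCast, PySem.List.pyGetD_natCast]
    rw [pvPsums_getD a 0 (t + K) htK, pvPsums_getD a 0 t (by omega),
        pvWsums_getD a 0 0 (t + K) htK, pvWsums_getD a 0 0 t (by omega)]
    rw [pvSum_take a (t + K) htK, pvSum_take a t (by omega),
        pvWsum_take a 0 (t + K) htK, pvWsum_take a 0 t (by omega)]
    simp only [zero_add]
    rw [← pvCore (fun j => a.getD j 0) K t hK1]
    refine Finset.sum_congr rfl (fun u hu => ?_)
    have huK : u < K - 1 := Finset.mem_range.mp hu
    simp only [Function.comp_apply]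
    rw [PySem.List.pyGetD_map_pyRange_one _ (t : Int) ((t : Int) + ((K : Int) - 1)) u 0
        (by omega)]
    rw [show (t : Int) + (u : Int) = ((t + u : Nat) : Int) by push_cast; ring]
    rw [PySem.List.pyGetD_natCast,
        PySem.List.getD_map_range (fun u => a.getD (u+1) 0 - a.getD u 0) (a.length - 1)
          (t + u) 0 (by omega)]
  rw [List.map_congr_left hFG]
  exact pvFusedMinFold2 _ _ M (by omega) hFG
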